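-- pv_equiv track=rewrite | github.com/ASSERT-KTH/Mokav | experiments/pynguin/c4b/single-return/generated_tests/src_2398/2/src_2398.py | func
-- ===== SOURCE A (Python) =====
-- def func(*args):
--
-- 	a = args[0]
-- 	a = a.lower()
-- 	x = ''
-- 	for i in range(len(a)):
-- 	    if ((a[i] == 'a') or (a[i] == 'e') or (a[i] == 'i') or (a[i] == 'o') or (a[i] == 'u') or (a[i] == 'y')):
-- 	        x += ''
-- 	    else:
-- 	        x += ('.' + a[i])
-- 	return(x)
-- ===== SOURCE B (Python) =====
-- def func(*args):
--     a = args[0].lower()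
--     table = {ord(c): ('' if c in 'aeiouy' else '.' + c) for c in set(a)}
--     return a.translate(table)
-- ===== Notes on version B (the rewrite author's own statement) =====
-- stated objective: faster
-- what changed: Replaces A's per-character test-and-concatenate loop by a table-driven translation: build a dict mapping each distinct character of the lowered string to its replacement ('' for vowels, '.'+c otherwise) once, then apply it in a single str.translate pass.
import Mathlib
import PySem

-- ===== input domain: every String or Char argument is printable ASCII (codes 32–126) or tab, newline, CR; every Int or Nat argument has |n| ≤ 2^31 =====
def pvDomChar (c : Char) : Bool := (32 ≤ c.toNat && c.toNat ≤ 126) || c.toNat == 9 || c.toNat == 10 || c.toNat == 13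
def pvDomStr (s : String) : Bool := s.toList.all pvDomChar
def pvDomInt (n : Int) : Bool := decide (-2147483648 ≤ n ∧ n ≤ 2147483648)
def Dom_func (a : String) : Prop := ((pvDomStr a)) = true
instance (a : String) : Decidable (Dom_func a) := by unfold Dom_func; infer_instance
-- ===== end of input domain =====

-- B: table-driven translation (a per-character replacement dict built once, applied in one translate pass)
-- instead of A's fused test-and-concatenate loop; avoids A's repeated string concatenation.

-- ===== PORT A =====
def pvVowel (c : Char) : Bool :=
  c == 'a' || c == 'e' || c == 'i' || c == 'o' || c == 'u' || c == 'y'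

-- A's loop over i in range(len(a)) visits the characters of the lowered string in
-- order; ported as a fold over those characters with the same accumulator x.
def func (a : String) : String :=
  String.ofList (((PySem.Str.lower a).toList).foldl
    (fun x c => if pvVowel c then x else x ++ ['.', c]) [])

-- ===== PORT B =====
-- the dict comprehension over set(a): replacement table keyed by character
-- (Python keys by ord(c); ord is injective on Char, so keying by the Char itself is exact).
def pvTable (s : List Char) : PySem.Dict Char String :=
  (PySem.Set.ofList s).foldl
    (fun d c => d.insert c (if ("aeiouy".toList).contains c then "" else String.ofList ['.', c]))
    PySem.Dict.empty

-- a.translate(table): each char is replaced by its table entry, kept if absent (exact port of translate).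
def func_alt (a : String) : String :=
  let s := (PySem.Str.lower a).toList
  let table := pvTable s
  String.ofList (s.flatMap (fun c => match table.get? c with
    | some r => r.toList
    | none => [c]))

-- ===== PRECONDITION & SPEC =====
def Spec_func (a : String) (out : String) : Prop := out = func_alt a
instance (a : String) (out : String) : Decidable (Spec_func a out) := by unfold Spec_func; infer_instance

-- ===== CLAIM (what is proved, stated in full; the proofs are below) =====
def Claim_equal_func : Prop := ∀ (a : String), Dom_func a → Spec_func a (func a)

-- ===== LEMMAS AND PROOFS =====

-- A's fold produces the concatenation of per-character replacements.
theorem pv_loop_eq (l : List Char) (acc : List Char) :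
    l.foldl (fun x c => if pvVowel c then x else x ++ ['.', c]) acc
      = acc ++ l.flatMap (fun c => if pvVowel c then [] else ['.', c]) := by
  induction l generalizing acc with
  | nil => simp
  | cons c l ih =>
    simp only [List.foldl_cons, List.flatMap_cons]
    by_cases h : pvVowel c = true <;> simp [h, ih, List.append_assoc]

-- lookup in a dict built by inserting a key-determined value for each list element
theorem pv_get?_foldl_insert (l : List Char) (f : Char → String)
    (d : PySem.Dict Char String) (c : Char) :
    (l.foldl (fun d x => d.insert x (f x)) d).get? c
      = if c ∈ l then some (f c) else d.get? c := by
  induction l generalizing d with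
  | nil => simp
  | cons x l ih =>
    simp only [List.foldl_cons, ih, PySem.Dict.get?_insert, List.mem_cons]
    by_cases hc : c ∈ l
    · simp [hc]
    · by_cases he : c = x <;> simp [hc, he]

-- the table's entry for any character of the string
theorem pv_table_get? (s : List Char) (c : Char) (hc : c ∈ s) :
    (pvTable s).get? c
      = some (if ("aeiouy".toList).contains c then "" else String.ofList ['.', c]) := by
  unfold pvTable
  rw [pv_get?_foldl_insert]
  simp [PySem.Set.mem_ofList, hc]

-- A's membership test and B's membership test agree
theorem pv_vowel_contains (c : Char) :
    ("aeiouy".toList).contains c = pvVowel c := by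
  show (['a','e','i','o','u','y'] : List Char).contains c = pvVowel c
  simp only [List.contains_cons, List.contains_nil, pvVowel, Bool.or_false, Bool.or_assoc]

-- ===== VERDICT (by name: the statement is the Claim_ definition above) =====
theorem func_spec : Claim_equal_func := by
  intro a _
  show func a = func_alt a
  unfold func func_alt
  rw [pv_loop_eq, List.nil_append]
  exact congrArg String.ofList (List.flatMap_congr (fun c hc => by
    rw [pv_table_get? _ _ hc, pv_vowel_contains]
    cases h : pvVowel c
    · simp
    · simp))
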